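-- pv_equiv track=rewrite | github.com/Coltainz/4110formalLanguage | main.py | kleene_closure_generator
-- ===== SOURCE A (Python) =====
-- def kleene_closure_generator(base_language, max_length):
--
--     #checks if w is string and then puts it into set, which will also get rid of duplicates
--     is_base_language = set()
--     for w in base_language:
--         if isinstance(w, str):
--             is_base_language.add(w)
--
--     correct_length = set()
--     for w in is_base_language:
--         if len(w) > 0 and len(w) <= max_length:
--             correct_length.add(w)
--
--
--     # Create a list of sets.
--     # Each index will store all strings we can build of that length.
--     combinations_by_length = []
--
--     # Fill the list with empty sets for every possible length from 0 up to max_length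
--     for length_index in range(max_length + 1):       # 0,1,2,...max_length
--         combinations_by_length.append(set())         # make an empty set for each length
--
--     # Base case: for length 0 we can always make the empty string
--     combinations_by_length[0].add("")                # start with an empty string of length 0
--
--
--     # Outer loop: build strings for every target length from 1 up to max_length
--     for target_length in range(1, max_length + 1):
--
--     # Check every allowed word piece
--         for word_piece in correct_length:
--
--     # How long is this word piece?
--             piece_length = len(word_piece)
--
--     # Only proceed if the piece fits into the current target length
--             if piece_length <= target_length:
--
--     # Figure out how much length is left before adding this piece.
--     # We will extend all existing strings of this leftover length.
--                 leftover_length = target_length - piece_length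
--
--     # Look at every string we already know how to make of leftover_length
--                 for existing_string in combinations_by_length[leftover_length]:
--
--     # Create a new string by adding the word_piece to the end
--                     new_string = existing_string + word_piece
--
--     # Store that new string in the bucket for the current target length
--                     combinations_by_length[target_length].add(new_string)
--
--
--
-- # Collect everything of length 0..max_length into one set to return
--     result_set = set()
--
--     # Add every string from each length bucket
--     length_index = 0
--     while length_index <= max_length:
--         for s in combinations_by_length[length_index]:
--             result_set.add(s)
--         length_index += 1
--
--     return result_set
-- ===== SOURCE B (Python) =====
-- # B: top-down memoized recursion over target length with one set comprehension per
-- # length, instead of A's bottom-up triple loop mutating a bucket table. (objective: simpler)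
-- def _bucket(length, words, memo):
--     if length == 0:
--         return {""}
--     if length not in memo:
--         memo[length] = {s + w for w in words if 0 < len(w) <= length
--                         for s in _bucket(length - len(w), words, memo)}
--     return memo[length]
--
-- def kleene_closure_generator(base_language, max_length):
--     words = {w for w in base_language if isinstance(w, str) and 0 < len(w) <= max_length}
--     memo = {}
--     return {s for length in range(max_length + 1) for s in _bucket(length, words, memo)}
-- ===== Notes on version B (the rewrite author's own statement) =====
-- stated objective: simpler
-- what changed: Replaces A's bottom-up triple loop over a mutable list of length buckets (plus a separate collection loop) with a top-down memoized recursion: bucket(L) is one set comprehension over the recursively obtained shorter buckets, and the result is a single comprehension over all lengths.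
import Mathlib
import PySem

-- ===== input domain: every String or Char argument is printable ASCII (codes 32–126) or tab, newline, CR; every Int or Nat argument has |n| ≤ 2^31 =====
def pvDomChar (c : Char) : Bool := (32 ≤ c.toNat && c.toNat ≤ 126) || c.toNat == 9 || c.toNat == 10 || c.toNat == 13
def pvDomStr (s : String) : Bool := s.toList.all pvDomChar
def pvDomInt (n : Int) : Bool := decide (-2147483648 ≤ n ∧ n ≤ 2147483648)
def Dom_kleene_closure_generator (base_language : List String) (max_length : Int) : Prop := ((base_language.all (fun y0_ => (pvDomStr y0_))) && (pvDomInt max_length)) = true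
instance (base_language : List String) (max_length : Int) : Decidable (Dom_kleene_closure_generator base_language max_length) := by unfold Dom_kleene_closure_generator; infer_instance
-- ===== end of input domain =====

-- ===== PORT A =====
-- literal transliteration of A: two set-building loops, a mutable list of buckets
-- (one set per length), a triple loop filling bucket[target] in place, then a
-- collection loop over all buckets.
def kleene_closure_generator (base_language : List String) (max_length : Int) : List String :=
  let is_base_language : PySem.Set String :=
    base_language.foldl (fun s w => PySem.Set.add s w) PySem.Set.empty  -- isinstance(w, str) is always true for typed input
  let correct_length : PySem.Set String :=
    is_base_language.foldl
      (fun s w => if 0 < PySem.Str.len w ∧ PySem.Str.len w ≤ max_length then PySem.Set.add s w else s)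
      PySem.Set.empty
  let combinations0 : List (PySem.Set String) :=
    (PySem.List.pyRange 0 (max_length + 1) 1).foldl (fun l _ => l ++ [PySem.Set.empty]) []
  -- combinations_by_length[0].add("")  (IndexError when max_length < 0 — excluded by Pre_)
  let combinations1 : List (PySem.Set String) :=
    PySem.List.pySetD combinations0 0
      (PySem.Set.add (PySem.List.pyGetD combinations0 0 PySem.Set.empty) "")
  let table : List (PySem.Set String) :=
    (PySem.List.pyRange 1 (max_length + 1) 1).foldl
      (fun tbl target =>
        correct_length.foldl
          (fun tbl word_piece =>
            if PySem.Str.len word_piece ≤ target then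
              (PySem.List.pyGetD tbl (target - PySem.Str.len word_piece) PySem.Set.empty).foldl
                (fun tbl existing_string =>
                  PySem.List.pySetD tbl target
                    (PySem.Set.add (PySem.List.pyGetD tbl target PySem.Set.empty)
                      (existing_string ++ word_piece)))
                tbl
            else tbl)
          tbl)
      combinations1
  (PySem.List.pyRange 0 (max_length + 1) 1).foldl
    (fun result_set length_index =>
      (PySem.List.pyGetD table length_index PySem.Set.empty).foldl
        (fun r s => PySem.Set.add r s) result_set)
    PySem.Set.empty

-- ===== PORT B =====
-- bucket(length) of Source B: memoization elided (pure recursion computes the same sets),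
-- the comprehension is filter + flatMap + map with a final set() dedup.
def pvAltBucket (words : List String) (length : Nat) : List String :=
  if length = 0 then [""]
  else
    PySem.Set.ofList
      ((words.filter (fun w => 0 < PySem.Str.len w ∧ PySem.Str.len w ≤ (length : Int))).attach.flatMap
        (fun w => (pvAltBucket words (length - (PySem.Str.len w.1).toNat)).map (fun s => s ++ w.1)))
termination_by length
decreasing_by
  have hw := w.2
  simp only [List.mem_filter, decide_eq_true_eq] at hw
  omega

def kleene_closure_generator_alt (base_language : List String) (max_length : Int) : List String :=
  let words : PySem.Set String :=
    PySem.Set.ofList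
      (base_language.filter (fun w => 0 < PySem.Str.len w ∧ PySem.Str.len w ≤ max_length))
  PySem.Set.ofList
    ((PySem.List.pyRange 0 (max_length + 1) 1).flatMap (fun length => pvAltBucket words length.toNat))

-- ===== PRECONDITION & SPEC =====
-- Pre_ excludes max_length < 0, where A indexes an empty bucket list and raises IndexError.
def Pre_kleene_closure_generator (base_language : List String) (max_length : Int) : Prop :=
  0 ≤ max_length
instance (base_language : List String) (max_length : Int) : Decidable (Pre_kleene_closure_generator base_language max_length) := by unfold Pre_kleene_closure_generator; infer_instance

def pvWitness_kleene_closure_generator : List String × Int := (["a", "bb"], 3)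

def Spec_kleene_closure_generator (base_language : List String) (max_length : Int) (out : List String) : Prop := out = kleene_closure_generator_alt base_language max_length
instance (base_language : List String) (max_length : Int) (out : List String) : Decidable (Spec_kleene_closure_generator base_language max_length out) := by unfold Spec_kleene_closure_generator; infer_instance

-- ===== CLAIM (what is proved, stated in full; the proofs are below) =====
def Claim_equal_kleene_closure_generator : Prop := ∀ (base_language : List String) (max_length : Int), Dom_kleene_closure_generator base_language max_length → Pre_kleene_closure_generator base_language max_length → Spec_kleene_closure_generator base_language max_length (kleene_closure_generator base_language max_length)

-- ===== LEMMAS AND PROOFS =====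


-- generic ite-fold = filter-fold
theorem pv_foldl_ite {α β : Type} (q : α → Prop) [DecidablePred q] (g : β → α → β) :
    ∀ (xs : List α) (a : β),
      xs.foldl (fun b w => if q w then g b w else b) a
        = (xs.filter (fun w => decide (q w))).foldl g a := by
  intro xs
  induction xs with
  | nil => intro a; rfl
  | cons x xs ih =>
    intro a
    by_cases h : q x <;> simp [List.filter_cons, h, ih]

theorem pv_add_of_mem {α : Type} [BEq α] [LawfulBEq α] (s : PySem.Set α) (x : α) (h : x ∈ s) :
    PySem.Set.add s x = s := by
  unfold PySem.Set.add
  simp [PySem.Set.contains_eq_listContains, h]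

theorem pv_ofList_append_singleton {α : Type} [BEq α] (xs : List α) (x : α) :
    PySem.Set.ofList (xs ++ [x]) = PySem.Set.add (PySem.Set.ofList xs) x := by
  simp [PySem.Set.ofList_eq_foldl]

theorem pv_ofList_filter_ofList {α : Type} [BEq α] [LawfulBEq α] (q : α → Bool) (xs : List α) :
    PySem.Set.ofList ((PySem.Set.ofList xs).filter q) = PySem.Set.ofList (xs.filter q) := by
  induction xs using List.reverseRecOn with
  | nil => rfl
  | append_singleton xs x ih =>
    rw [pv_ofList_append_singleton]
    by_cases hmem : x ∈ PySem.Set.ofList xs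
    · rw [pv_add_of_mem _ _ hmem, ih, List.filter_append]
      by_cases hq : q x
      · simp only [List.filter_cons, hq, if_pos, List.filter_nil, pv_ofList_append_singleton]
        have hx : x ∈ (xs.filter q) := List.mem_filter.2 ⟨(PySem.Set.mem_ofList xs x).1 hmem, hq⟩
        exact (pv_add_of_mem _ x ((PySem.Set.mem_ofList _ x).2 hx)).symm
      · simp [List.filter_cons, hq]
    · have : PySem.Set.add (PySem.Set.ofList xs) x = PySem.Set.ofList xs ++ [x] := by
        unfold PySem.Set.add
        simp [PySem.Set.contains_eq_listContains, hmem]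
      rw [this, List.filter_append, List.filter_append]
      by_cases hq : q x
      · simp only [List.filter_cons, hq, if_pos, List.filter_nil]
        rw [pv_ofList_append_singleton, pv_ofList_append_singleton, ih]
      · simp [List.filter_cons, hq, ih]

-- innermost loop: repeatedly set index t, accumulating adds
theorem pv_innermost (w : String) :
    ∀ (xs : List String) (tbl : List (List String)) (t : Nat), t < tbl.length →
      xs.foldl (fun tb s => tb.set t (PySem.Set.add (tb.getD t PySem.Set.empty) (s ++ w))) tbl
        = tbl.set t (xs.foldl (fun b s => PySem.Set.add b (s ++ w)) (tbl.getD t PySem.Set.empty)) := by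
  intro xs
  induction xs with
  | nil =>
    intro tbl t ht
    rw [List.foldl_nil, List.getD_eq_getElem?_getD, List.getElem?_eq_getElem ht]
    simp [List.set_getElem_self]
  | cons s xs ih =>
    intro tbl t ht
    simp only [List.foldl_cons]
    rw [ih _ t (by simpa using ht)]
    have hg : (tbl.set t (PySem.Set.add (tbl.getD t PySem.Set.empty) (s ++ w))).getD t PySem.Set.empty
        = PySem.Set.add (tbl.getD t PySem.Set.empty) (s ++ w) := by
      rw [List.getD_eq_getElem?_getD, List.getElem?_set_self (by simpa using ht)]
      rfl
    rw [hg, List.set_set]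

theorem pv_pyGetD_toNat (xs : List (List String)) (i : Int) (h : 0 ≤ i) :
    PySem.List.pyGetD xs i PySem.Set.empty = xs.getD i.toNat PySem.Set.empty := by
  rw [← Int.toNat_of_nonneg h, PySem.List.pyGetD_natCast, Int.toNat_of_nonneg h]

theorem pv_middle (t : Int) (ht : 1 ≤ t) (tbl : List (List String)) (htl : t.toNat < tbl.length) :
    ∀ (ws : List String), (∀ w ∈ ws, 0 < PySem.Str.len w) → ∀ (b : List String),
      ws.foldl (fun tb w => if PySem.Str.len w ≤ t then
           (PySem.List.pyGetD tb (t - PySem.Str.len w) PySem.Set.empty).foldl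
             (fun tb s => PySem.List.pySetD tb t (PySem.Set.add (PySem.List.pyGetD tb t PySem.Set.empty) (s ++ w))) tb
         else tb) (tbl.set t.toNat b)
      = tbl.set t.toNat (ws.foldl (fun b w => if PySem.Str.len w ≤ t then
           (PySem.List.pyGetD tbl (t - PySem.Str.len w) PySem.Set.empty).foldl (fun b s => PySem.Set.add b (s ++ w)) b
         else b) b) := by
  intro ws
  induction ws with
  | nil => intro _ b; rfl
  | cons w ws ih =>
    intro hws b
    have hw : 0 < PySem.Str.len w := hws w (by simp)
    simp only [List.foldl_cons]
    by_cases hc : PySem.Str.len w ≤ t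
    · rw [if_pos hc, if_pos hc]
      have hnn : (0:Int) ≤ t - PySem.Str.len w := by omega
      have hne : t.toNat ≠ (t - PySem.Str.len w).toNat := by omega
      have hx0 : PySem.List.pyGetD (tbl.set t.toNat b) (t - PySem.Str.len w) PySem.Set.empty
          = PySem.List.pyGetD tbl (t - PySem.Str.len w) PySem.Set.empty := by
        rw [pv_pyGetD_toNat _ _ hnn, pv_pyGetD_toNat _ _ hnn,
          List.getD_eq_getElem?_getD, List.getD_eq_getElem?_getD, List.getElem?_set_ne hne]
      rw [hx0]
      have hfun : (fun (tb : List (List String)) (s : String) =>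
            PySem.List.pySetD tb t (PySem.Set.add (PySem.List.pyGetD tb t PySem.Set.empty) (s ++ w)))
          = fun tb s => tb.set t.toNat (PySem.Set.add (tb.getD t.toNat PySem.Set.empty) (s ++ w)) := by
        funext tb s
        rw [PySem.List.pySetD_of_nonneg tb _ (show (0:Int) ≤ t by omega), pv_pyGetD_toNat _ _ (show (0:Int) ≤ t by omega)]
      rw [hfun, pv_innermost _ _ _ _ (by simpa using htl)]
      have hb : (tbl.set t.toNat b).getD t.toNat PySem.Set.empty = b := by
        rw [List.getD_eq_getElem?_getD, List.getElem?_set_self htl]; rfl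
      rw [hb, List.set_set]
      exact ih (fun w' h' => hws w' (by simp [h'])) _
    · rw [if_neg hc, if_neg hc]
      exact ih (fun w' h' => hws w' (by simp [h'])) _

theorem pv_bucket_step (W : List String) (hW : ∀ w ∈ W, 0 < PySem.Str.len w)
    (t : Int) (ht : 1 ≤ t) (tbl : List (List String))
    (hread : ∀ w ∈ W, PySem.Str.len w ≤ t →
        PySem.List.pyGetD tbl (t - PySem.Str.len w) PySem.Set.empty
          = pvAltBucket W (t.toNat - (PySem.Str.len w).toNat)) :
    W.foldl (fun b w => if PySem.Str.len w ≤ t then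
        (PySem.List.pyGetD tbl (t - PySem.Str.len w) PySem.Set.empty).foldl (fun b s => PySem.Set.add b (s ++ w)) b
      else b) PySem.Set.empty
    = pvAltBucket W t.toNat := by
  rw [pvAltBucket, if_neg (by omega : ¬ t.toNat = 0)]
  simp only [List.flatMap_subtype, List.unattach_attach]
  rw [PySem.Set.ofList_eq_foldl, List.foldl_flatMap]
  rw [pv_foldl_ite (fun w => PySem.Str.len w ≤ t)]
  rw [List.filter_congr (p := fun w => decide (PySem.Str.len w ≤ t))
      (q := fun w => decide (0 < PySem.Str.len w ∧ PySem.Str.len w ≤ (t.toNat : Int)))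
      (fun w hw => by
        have h1 := hW w hw
        simp only [decide_eq_decide]
        omega)]
  apply PySem.List.foldl_congr_mem
  intro acc w hw
  have hwW : w ∈ W := List.mem_filter.1 hw |>.1
  have hcond := List.mem_filter.1 hw |>.2
  have hcond' : 0 < PySem.Str.len w ∧ PySem.Str.len w ≤ (t.toNat : Int) := by simpa using hcond
  rw [hread w hwW (by omega), List.foldl_map]

def pvTbl (W : List String) (n j : Nat) : List (List String) :=
  (List.range n).map (fun L => if L ≤ j then pvAltBucket W L else [])

theorem pvTbl_length (W : List String) (n j : Nat) : (pvTbl W n j).length = n := by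
  simp [pvTbl]

theorem pvTbl_getD (W : List String) (n j k : Nat) (hk : k < n) :
    (pvTbl W n j).getD k PySem.Set.empty = if k ≤ j then pvAltBucket W k else [] := by
  rw [List.getD_eq_getElem?_getD, pvTbl, List.getElem?_map, List.getElem?_range hk]
  rfl

theorem pv_init (W : List String) (n : Nat) :
    (List.replicate (n+1) PySem.Set.empty).set 0 (PySem.Set.add PySem.Set.empty "") = pvTbl W (n+1) 0 := by
  apply List.ext_getElem
  · simp [pvTbl]
  · intro i h1 h2
    have hi : i < n + 1 := by simpa using h1
    rcases Nat.eq_zero_or_pos i with hi0 | hip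
    · subst hi0
      rw [List.getElem_set_self]
      simp only [pvTbl, List.getElem_map, List.getElem_range]
      rw [if_pos (by omega), pvAltBucket]
      rfl
    · rw [List.getElem_set_ne (by omega)]
      simp only [pvTbl, List.getElem_map, List.getElem_range]
      rw [if_neg (by omega)]
      simp [List.getElem_replicate]

theorem pvTbl_set_self (W : List String) (n j : Nat) (hj : j + 1 ≤ n) :
    (pvTbl W (n+1) j).set (j+1) PySem.Set.empty = pvTbl W (n+1) j := by
  apply List.ext_getElem
  · simp
  · intro i h1 h2
    have hi : i < n + 1 := by simpa [pvTbl] using h2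
    by_cases hij : i = j + 1
    · subst hij
      rw [List.getElem_set_self (by simpa [pvTbl] using hi)]
      simp only [pvTbl, List.getElem_map, List.getElem_range]
      rw [if_neg (by omega)]
      rfl
    · rw [List.getElem_set_ne (fun h => hij h.symm)]

theorem pvTbl_set_succ (W : List String) (n j : Nat) (hj : j + 1 ≤ n) :
    (pvTbl W (n+1) j).set (j+1) (pvAltBucket W (j+1)) = pvTbl W (n+1) (j+1) := by
  apply List.ext_getElem
  · simp [pvTbl]
  · intro i h1 h2
    have hi : i < n + 1 := by simpa [pvTbl] using h2
    by_cases hij : i = j + 1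
    · subst hij
      rw [List.getElem_set_self (by simpa [pvTbl] using hi)]
      simp only [pvTbl, List.getElem_map, List.getElem_range]
      rw [if_pos (by omega)]
    · rw [List.getElem_set_ne (fun h => hij h.symm)]
      simp only [pvTbl, List.getElem_map, List.getElem_range]
      by_cases h3 : i ≤ j
      · rw [if_pos h3, if_pos (by omega)]
      · rw [if_neg h3, if_neg (by omega)]

theorem pv_step (W : List String) (hW : ∀ w ∈ W, 0 < PySem.Str.len w) (mN j : Nat) (hj : j + 1 ≤ mN) :
    W.foldl (fun tbl w => if PySem.Str.len w ≤ ((j:Int)+1) then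
        (PySem.List.pyGetD tbl (((j:Int)+1) - PySem.Str.len w) PySem.Set.empty).foldl
          (fun tbl s => PySem.List.pySetD tbl ((j:Int)+1)
            (PySem.Set.add (PySem.List.pyGetD tbl ((j:Int)+1) PySem.Set.empty) (s ++ w))) tbl
      else tbl) (pvTbl W (mN+1) j)
    = pvTbl W (mN+1) (j+1) := by
  have htn : (((j:Int)+1)).toNat = j + 1 := by omega
  have hstart : pvTbl W (mN+1) j = (pvTbl W (mN+1) j).set (((j:Int)+1)).toNat PySem.Set.empty := by
    rw [htn, pvTbl_set_self W mN j hj]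
  rw [hstart]
  rw [pv_middle ((j:Int)+1) (by omega) (pvTbl W (mN+1) j) (by rw [htn, pvTbl_length]; omega) W hW PySem.Set.empty]
  rw [pv_bucket_step W hW ((j:Int)+1) (by omega) (pvTbl W (mN+1) j)
      (fun w hw hlen => by
        have hwp := hW w hw
        have hnn : (0:Int) ≤ ((j:Int)+1) - PySem.Str.len w := by omega
        rw [pv_pyGetD_toNat _ _ hnn]
        rw [pvTbl_getD W (mN+1) j ((((j:Int)+1) - PySem.Str.len w).toNat) (by omega)]
        rw [if_pos (by omega)]
        congr 1
        omega)]
  rw [htn, pvTbl_set_succ W mN j hj]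

theorem pv_outer (W : List String) (hW : ∀ w ∈ W, 0 < PySem.Str.len w) (mN : Nat) :
    ∀ j : Nat, j ≤ mN →
      (PySem.List.pyRange 1 ((j:Int)+1) 1).foldl
        (fun tbl target =>
          W.foldl (fun tbl w => if PySem.Str.len w ≤ target then
              (PySem.List.pyGetD tbl (target - PySem.Str.len w) PySem.Set.empty).foldl
                (fun tbl s => PySem.List.pySetD tbl target
                  (PySem.Set.add (PySem.List.pyGetD tbl target PySem.Set.empty) (s ++ w))) tbl
            else tbl) tbl)
        (pvTbl W (mN+1) 0)
      = pvTbl W (mN+1) j := by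
  intro j
  induction j with
  | zero =>
    intro _
    rfl
  | succ j ih =>
    intro hj
    have hcast : (((j+1 : Nat)):Int) + 1 = ((j:Int) + 1) + 1 := by push_cast; ring
    rw [hcast, PySem.List.pyRange_one_succ_right (by omega), List.foldl_append]
    rw [ih (by omega)]
    simp only [List.foldl_cons, List.foldl_nil]
    exact pv_step W hW mN j (by omega)

theorem pv_replicate (n : Nat) (v : List String) :
    (PySem.List.pyRange 0 ((n:Int)) 1).foldl (fun l _ => l ++ [v]) [] = List.replicate n v := by
  simp

-- ===== VERDICT (by name: the statement is the Claim_ definition above) =====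
theorem kleene_closure_generator_spec : Claim_equal_kleene_closure_generator := by
  unfold Claim_equal_kleene_closure_generator
  intro bl m hdom hpre
  unfold Spec_kleene_closure_generator
  have hpre' : (0:Int) ≤ m := hpre
  obtain ⟨mN, hm⟩ : ∃ mN : Nat, m = (mN : Int) := ⟨m.toNat, by omega⟩
  subst hm
  simp only [kleene_closure_generator, kleene_closure_generator_alt]
  rw [show bl.foldl (fun s w => PySem.Set.add s w) PySem.Set.empty = PySem.Set.ofList bl from
    (PySem.Set.ofList_eq_foldl bl).symm]
  rw [pv_foldl_ite (fun w => 0 < PySem.Str.len w ∧ PySem.Str.len w ≤ (mN:Int)) PySem.Set.add]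
  rw [show (List.filter (fun w => decide (0 < PySem.Str.len w ∧ PySem.Str.len w ≤ (mN:Int))) (PySem.Set.ofList bl)).foldl PySem.Set.add PySem.Set.empty
      = PySem.Set.ofList ((PySem.Set.ofList bl).filter (fun w => decide (0 < PySem.Str.len w ∧ PySem.Str.len w ≤ (mN:Int)))) from
    (PySem.Set.ofList_eq_foldl _).symm]
  rw [pv_ofList_filter_ofList]
  set W := PySem.Set.ofList (bl.filter (fun w => decide (0 < PySem.Str.len w ∧ PySem.Str.len w ≤ (mN:Int)))) with hWdef
  have hW : ∀ w ∈ W, 0 < PySem.Str.len w := by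
    intro w hw
    rw [hWdef, PySem.Set.mem_ofList] at hw
    have := (List.mem_filter.1 hw).2
    simp only [decide_eq_true_eq] at this
    exact this.1
  rw [show ((mN:Int) + 1) = (((mN+1 : Nat)):Int) by push_cast; ring]
  rw [pv_replicate (mN+1) PySem.Set.empty]
  rw [PySem.List.pyGetD_zero]
  rw [show (List.replicate (mN+1) (PySem.Set.empty : List String)).getD 0 PySem.Set.empty = PySem.Set.empty by
    simp [List.getD_eq_getElem?_getD]]
  rw [PySem.List.pySetD_of_nonneg _ _ (by omega : (0:Int) ≤ 0)]
  rw [show ((0:Int)).toNat = 0 from rfl]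
  rw [pv_init W mN]
  rw [show (((mN+1 : Nat)):Int) = ((mN:Int) + 1) by push_cast; ring]
  rw [pv_outer W hW mN mN (by omega)]
  rw [PySem.Set.ofList_eq_foldl, List.foldl_flatMap]
  apply PySem.List.foldl_congr_mem
  intro acc L hL
  rw [PySem.List.mem_pyRange_one] at hL
  rw [pv_pyGetD_toNat _ _ (by omega)]
  rw [pvTbl_getD W (mN+1) mN L.toNat (by omega)]
  rw [if_pos (by omega)]
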